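-- pv_equiv track=rewrite | github.com/inhahe/qtpyrc | asyncirc.py | _unescape_tag_value
-- ===== SOURCE A (Python) =====
-- _TAG_UNESCAPE = {
--     ':': ';', 's': ' ', '\\': '\\', 'r': '\r', 'n': '\n',
-- }
--
-- def _unescape_tag_value(value):
--     """Unescape an IRCv3 message tag value."""
--     result = []
--     i = 0
--     while i < len(value):
--         if value[i] == '\\' and i + 1 < len(value):
--             result.append(_TAG_UNESCAPE.get(value[i + 1], value[i + 1]))
--             i += 2
--         else:
--             result.append(value[i])
--             i += 1
--     return ''.join(result)
-- ===== SOURCE B (Python) =====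
-- _TAG_UNESCAPE = {
--     ':': ';', 's': ' ', '\\': '\\', 'r': '\r', 'n': '\n',
-- }
--
-- def _unescape_tag_value(value):
--     """Unescape an IRCv3 message tag value."""
--     pieces = value.split('\\')
--     out = [pieces[0]]
--     k = 1
--     n = len(pieces)
--     while k < n:
--         p = pieces[k]
--         if p:
--             out.append(_TAG_UNESCAPE.get(p[0], p[0]) + p[1:])
--             k += 1
--         elif k + 1 < n:
--             # empty piece: the backslash was followed by another backslash,
--             # which is the escaped character; the next piece is taken raw
--             out.append('\\' + pieces[k + 1])
--             k += 2
--         else: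
--             # lone trailing backslash, kept as-is
--             out.append('\\')
--             k += 1
--     return ''.join(out)
-- ===== Notes on version B (the rewrite author's own statement) =====
-- stated objective: faster
-- what changed: Replaced the index-based per-character while loop with one split on '\\' followed by a loop over the pieces that unescapes only each later piece's first character (empty pieces encode an escaped backslash or a trailing lone backslash).
import Mathlib
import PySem

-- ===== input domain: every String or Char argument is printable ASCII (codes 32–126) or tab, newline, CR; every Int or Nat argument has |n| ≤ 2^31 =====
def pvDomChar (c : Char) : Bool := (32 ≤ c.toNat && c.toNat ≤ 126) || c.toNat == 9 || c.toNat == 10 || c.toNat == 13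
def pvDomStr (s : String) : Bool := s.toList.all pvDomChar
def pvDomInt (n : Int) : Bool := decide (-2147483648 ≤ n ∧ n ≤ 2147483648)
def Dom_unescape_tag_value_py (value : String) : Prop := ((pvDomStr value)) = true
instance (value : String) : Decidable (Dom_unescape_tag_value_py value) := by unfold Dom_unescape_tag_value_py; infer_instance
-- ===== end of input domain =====

-- B unescapes IRCv3 tag values by splitting once on '\' and rewriting each later piece's first
-- character, instead of A's index-based per-character while loop (measured constant-factor speedup).


-- _TAG_UNESCAPE (keys and values are single-character strings, modelled as Chars)
def pvTagUnescape : PySem.Dict Char Char :=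
  PySem.Dict.ofList [(':', ';'), ('s', ' '), ('\\', '\\'), ('r', '\r'), ('n', '\n')]

-- ===== PORT A =====
-- A's while loop: i steps by 2 over an escape pair, by 1 otherwise; result collects output chars
def pvLoopA (value : List Char) (i : Nat) (result : List Char) : List Char :=
  if h : i < value.length then
    if h2 : value[i] = '\\' ∧ i + 1 < value.length then
      pvLoopA value (i + 2)
        (result ++ [PySem.Dict.getD pvTagUnescape (value[i+1]'h2.2) (value[i+1]'h2.2)])
    else
      pvLoopA value (i + 1) (result ++ [value[i]])
  else result
termination_by value.length - i

def unescape_tag_value_py (value : String) : String :=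
  String.ofList (pvLoopA value.toList 0 [])

-- ===== PORT B =====
-- Source B's while loop over the pieces list: consumes one piece (nonempty), or an empty piece
-- plus the following raw piece (escaped backslash), or a final empty piece (trailing backslash)
def pvProcB : List (List Char) → List (List Char)
  | [] => []
  | (c :: t) :: rest => (PySem.Dict.getD pvTagUnescape c c :: t) :: pvProcB rest
  | [] :: q :: rest' => ('\\' :: q) :: pvProcB rest'
  | [[]] => [['\\']]

def unescape_tag_value_py_alt (value : String) : String :=
  match PySem.Chars.splitOn value.toList ['\\'] with
  | [] => ""   -- unreachable: split never returns an empty list (pieces[0] always exists)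
  | p0 :: rest => String.ofList (p0 ++ (pvProcB rest).flatten)

-- ===== PRECONDITION & SPEC =====
def Spec_unescape_tag_value_py (value : String) (out : String) : Prop := out = unescape_tag_value_py_alt value
instance (value : String) (out : String) : Decidable (Spec_unescape_tag_value_py value out) := by unfold Spec_unescape_tag_value_py; infer_instance

-- ===== CLAIM (what is proved, stated in full; the proofs are below) =====
def Claim_equal_unescape_tag_value_py : Prop := ∀ (value : String), Dom_unescape_tag_value_py value → Spec_unescape_tag_value_py value (unescape_tag_value_py value)

-- ===== LEMMAS AND PROOFS =====

-- reference recursion: the unescape both programs compute, by cases on the leading char(s)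
def pvF : List Char → List Char
  | [] => []
  | [c] => if c = '\\' then ['\\'] else [c]
  | c :: d :: t =>
    if c = '\\' then PySem.Dict.getD pvTagUnescape d d :: pvF t
    else c :: pvF (d :: t)

lemma pvF_cons_ne {c : Char} (hc : ¬ c = '\\') (cs : List Char) :
    pvF (c :: cs) = c :: pvF cs := by
  cases cs with
  | nil => simp [pvF, hc]
  | cons d t => simp [pvF, hc]

lemma pvF_bs_cons (d : Char) (t : List Char) :
    pvF ('\\' :: d :: t) = PySem.Dict.getD pvTagUnescape d d :: pvF t := by simp [pvF]

lemma pvF_bs_nil : pvF ['\\'] = ['\\'] := by simp [pvF]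

lemma pvBackslash : PySem.Dict.getD pvTagUnescape '\\' '\\' = '\\' := by decide

-- plain split-on-backslash with the current (unfinished) piece carried in front
def pvSp : List Char → List Char → List (List Char)
  | pre, [] => [pre]
  | pre, c :: r => if c = '\\' then pre :: pvSp [] r else pvSp (pre ++ [c]) r

lemma pvGo_eq : ∀ (fuel : Nat) (l cur : List Char) (acc : List (List Char)),
    l.length < fuel →
    PySem.Chars.splitOn.go ['\\'] fuel l cur acc = acc.reverse ++ pvSp cur.reverse l := by
  intro fuel
  induction fuel with
  | zero => intro l cur acc h; omega
  | succ n ih =>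
    intro l cur acc h
    cases l with
    | nil => simp [PySem.Chars.splitOn.go, pvSp]
    | cons c rest =>
      have hlen : rest.length < n := by simp at h; omega
      by_cases hc : c = '\\'
      · subst hc
        have hpre : List.isPrefixOf ['\\'] ('\\' :: rest) = true := by
          simp [List.isPrefixOf]
        simp only [PySem.Chars.splitOn.go, hpre, if_pos, List.length_cons, List.length_nil,
          List.drop_succ_cons, List.drop_zero]
        rw [ih rest [] (cur.reverse :: acc) hlen]
        simp [pvSp]
      · have hpre : List.isPrefixOf ['\\'] (c :: rest) = false := by
          simp [List.isPrefixOf]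
          exact fun hh => hc hh.symm
        simp only [PySem.Chars.splitOn.go, hpre, Bool.false_eq_true, if_false]
        rw [ih rest (c :: cur) acc hlen]
        simp [pvSp, hc]

lemma pvSplitOn_eq (l : List Char) : PySem.Chars.splitOn l ['\\'] = pvSp [] l := by
  unfold PySem.Chars.splitOn
  rw [pvGo_eq (l.length + 1) l [] [] (by omega)]
  simp

lemma pvSp_pre : ∀ (l pre : List Char), ∃ h t, pvSp pre l = (pre ++ h) :: t ∧ pvSp [] l = h :: t := by
  intro l
  induction l with
  | nil => intro pre; exact ⟨[], [], by simp [pvSp], by simp [pvSp]⟩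
  | cons c r ih =>
    intro pre
    by_cases hc : c = '\\'
    · subst hc
      exact ⟨[], pvSp [] r, by simp [pvSp], by simp [pvSp]⟩
    · obtain ⟨h, t, e1, e0⟩ := ih (pre ++ [c])
      obtain ⟨h2, t2, e1', e0'⟩ := ih [c]
      rw [e0] at e0'
      injection e0' with eh et
      rw [← eh, ← et] at e1'
      refine ⟨c :: h, t, ?_, ?_⟩
      · simpa [pvSp, hc] using e1
      · simpa [pvSp, hc] using e1'

lemma pvLoopA_eq : ∀ (n : Nat) (cs : List Char) (i : Nat), cs.length - i ≤ n →
    ∀ acc, pvLoopA cs i acc = acc ++ pvF (cs.drop i) := by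
  intro n
  induction n with
  | zero =>
    intro cs i hle acc
    rw [pvLoopA, dif_neg (by omega), List.drop_eq_nil_of_le (by omega)]
    simp [pvF]
  | succ n ih =>
    intro cs i hle acc
    by_cases h : i < cs.length
    · rw [pvLoopA, dif_pos h]
      by_cases h2 : cs[i] = '\\' ∧ i + 1 < cs.length
      · rw [dif_pos h2, ih cs (i + 2) (by omega)]
        have hd1 : cs.drop i = cs[i] :: cs.drop (i + 1) := List.drop_eq_getElem_cons h
        have hd2 : cs.drop (i + 1) = cs[i + 1] :: cs.drop (i + 2) := List.drop_eq_getElem_cons h2.2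
        rw [hd1, hd2, h2.1, pvF_bs_cons]
        simp
      · rw [dif_neg h2, ih cs (i + 1) (by omega)]
        have hd1 : cs.drop i = cs[i] :: cs.drop (i + 1) := List.drop_eq_getElem_cons h
        by_cases hb : cs[i] = '\\'
        · have hlen : ¬ i + 1 < cs.length := fun hh => h2 ⟨hb, hh⟩
          rw [hd1, List.drop_eq_nil_of_le (by omega), hb, pvF_bs_nil]
          simp [pvF]
        · rw [hd1, pvF_cons_ne hb]
          simp
    · rw [pvLoopA, dif_neg h, List.drop_eq_nil_of_le (by omega)]
      simp [pvF]

lemma pvMain : ∀ (n : Nat),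
    (∀ l : List Char, l.length ≤ n →
       (pvProcB (pvSp [] l)).flatten = pvF ('\\' :: l)) ∧
    (∀ l : List Char, l.length ≤ n → ∀ h t, pvSp [] l = h :: t →
       h ++ (pvProcB t).flatten = pvF l) := by
  intro n
  induction n with
  | zero =>
    constructor
    · intro l hl
      cases l with
      | nil => simp [pvSp, pvProcB, pvF]
      | cons c r => simp at hl
    · intro l hl h t heq
      cases l with
      | nil =>
        simp only [pvSp] at heq
        injection heq with eh et
        subst eh; subst et
        simp [pvProcB, pvF]
      | cons c r => simp at hl
  | succ n ih =>
    obtain ⟨ihN, ihM⟩ := ih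
    constructor
    · intro l hl
      cases l with
      | nil => simp [pvSp, pvProcB, pvF]
      | cons c r =>
        have hr : r.length ≤ n := by simp at hl; omega
        by_cases hc : c = '\\'
        · subst hc
          obtain ⟨h, t, _, e0⟩ := pvSp_pre r []
          have hstep : pvSp [] ('\\' :: r) = [] :: h :: t := by
            simp [pvSp, e0]
          have hM := ihM r hr h t e0
          rw [hstep, pvF_bs_cons, pvBackslash, ← hM]
          simp [pvProcB]
        · obtain ⟨h, t, e1, e0⟩ := pvSp_pre r [c]
          have hstep : pvSp [] (c :: r) = (c :: h) :: t := by
            simpa [pvSp, hc] using e1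
          have hM := ihM r hr h t e0
          rw [hstep, pvF_bs_cons, ← hM]
          simp [pvProcB]
    · intro l hl h t heq
      cases l with
      | nil =>
        simp only [pvSp] at heq
        injection heq with eh et
        subst eh; subst et
        simp [pvProcB, pvF]
      | cons c r =>
        have hr : r.length ≤ n := by simp at hl; omega
        by_cases hc : c = '\\'
        · subst hc
          have hstep : pvSp [] ('\\' :: r) = [] :: pvSp [] r := by
            simp [pvSp]
          rw [hstep] at heq
          injection heq with eh et
          subst eh; subst et
          simpa [pvF] using ihN r hr
        · obtain ⟨h2, t2, e1, e0⟩ := pvSp_pre r [c]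
          have hstep : pvSp [] (c :: r) = (c :: h2) :: t2 := by
            simpa [pvSp, hc] using e1
          rw [hstep] at heq
          injection heq with eh et
          subst eh; subst et
          have hM := ihM r hr h2 t2 e0
          rw [pvF_cons_ne hc, ← hM]
          simp

-- ===== VERDICT (by name: the statement is the Claim_ definition above) =====
theorem unescape_tag_value_py_spec : Claim_equal_unescape_tag_value_py := by
  intro value _
  unfold Spec_unescape_tag_value_py unescape_tag_value_py unescape_tag_value_py_alt
  rw [pvSplitOn_eq]
  obtain ⟨h, t, _, e0⟩ := pvSp_pre value.toList []
  rw [e0, pvLoopA_eq value.toList.length value.toList 0 (by omega)]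
  simp only [List.drop_zero, List.nil_append]
  congr 1
  exact ((pvMain value.toList.length).2 value.toList le_rfl h t e0).symm
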